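-- pv_equiv track=rewrite | github.com/GuyBillings/cluster-sub-system | support.py | complete_list
-- ===== SOURCE A (Python) =====
-- def remove_dups(s):
-- # remove duplicate entries in a list of lists
--   u = []
--   for x in s:
--     if x not in u:
--       u.append(x)
--   return u
--
-- def complete_list(query_list, varls):
-- # split list of items into a list of lists of complete sets
-- # complete set shows full range of the variable index in question
--   var_index=varls[0]
--   complete_number=varls[1]
--   nvars=varls[2]
--   testlist=[]
--   dexlist=[]
--   outlist=[]
--   for dex in range(nvars):
--     if dex!=var_index:
--       dexlist.append(dex)
--   for val in query_list:
--     testlist.append([val[i] for i in dexlist])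
--   uniqueitems=remove_dups(testlist)
--   for ui in uniqueitems:
--     count=testlist.count(ui)
--     if count==complete_number:
--       outlist.append([query_list[j] for j in [i for i,x in enumerate(testlist) if x == ui]])
--   return outlist
-- ===== SOURCE B (Python) =====
-- def complete_list(query_list, varls):
--     # Alternative structure: group rows by projection key in one dict pass; keep groups of the required size.
--     var_index = varls[0]
--     complete_number = varls[1]
--     nvars = varls[2]
--     groups = {}
--     for row in query_list:
--         key = tuple(row[i] for i in range(nvars) if i != var_index)
--         groups.setdefault(key, []).append(row)
--     return [g for g in groups.values() if len(g) == complete_number]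
-- ===== Notes on version B (the rewrite author's own statement) =====
-- stated objective: alternative
-- what changed: Replaces the multi-pass dedup-then-count-then-enumerate structure (remove_dups membership scan, testlist.count and an enumerate rescan per unique projection) with a single pass building a dict from projection key to the ordered list of rows, then filtering groups by size.
import Mathlib
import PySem

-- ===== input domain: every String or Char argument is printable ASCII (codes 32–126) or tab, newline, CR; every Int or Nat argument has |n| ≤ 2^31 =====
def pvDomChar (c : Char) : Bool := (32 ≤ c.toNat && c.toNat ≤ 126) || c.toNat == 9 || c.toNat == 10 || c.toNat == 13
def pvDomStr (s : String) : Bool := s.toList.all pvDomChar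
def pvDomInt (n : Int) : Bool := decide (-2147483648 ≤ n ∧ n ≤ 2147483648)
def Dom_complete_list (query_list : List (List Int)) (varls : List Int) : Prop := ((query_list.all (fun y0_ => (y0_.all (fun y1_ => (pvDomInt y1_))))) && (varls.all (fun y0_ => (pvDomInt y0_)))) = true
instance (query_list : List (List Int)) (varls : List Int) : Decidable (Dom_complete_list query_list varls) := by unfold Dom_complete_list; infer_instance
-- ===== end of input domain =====

-- B replaces A's dedup/count/enumerate multi-pass structure by one dict-grouping pass, then a size filter (alternative algorithm).

-- ===== PORT A =====
def removeDups (s : List (List Int)) : List (List Int) :=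
  s.foldl (fun u x => if x ∈ u then u else u ++ [x]) []

def complete_list (query_list : List (List Int)) (varls : List Int) : List (List (List Int)) :=
  let var_index : Int := PySem.List.pyGetD varls 0 0
  let complete_number : Int := PySem.List.pyGetD varls 1 0
  let nvars : Int := PySem.List.pyGetD varls 2 0
  let dexlist : List Int :=
    (PySem.List.pyRange 0 nvars 1).foldl (fun dl dex => if dex ≠ var_index then dl ++ [dex] else dl) []
  let testlist : List (List Int) :=
    query_list.foldl (fun tl val => tl ++ [dexlist.map (fun i => PySem.List.pyGetD val i 0)]) []
  let uniqueitems := removeDups testlist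
  uniqueitems.foldl (fun outlist ui =>
    if (testlist.count ui : Int) = complete_number then
      outlist ++ [((PySem.List.enumerate testlist 0).filter (fun p => p.2 == ui)).map
                    (fun p => PySem.List.pyGetD query_list p.1 [])]
    else outlist) []

-- ===== PORT B =====
def complete_list_alt (query_list : List (List Int)) (varls : List Int) : List (List (List Int)) :=
  let var_index : Int := PySem.List.pyGetD varls 0 0
  let complete_number : Int := PySem.List.pyGetD varls 1 0
  let nvars : Int := PySem.List.pyGetD varls 2 0
  let groups : PySem.Dict (List Int) (List (List Int)) :=
    query_list.foldl (fun d row =>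
      d.modify (((PySem.List.pyRange 0 nvars 1).filter (fun i => i ≠ var_index)).map
                  (fun i => PySem.List.pyGetD row i 0)) [] (· ++ [row])) PySem.Dict.empty
  (PySem.Dict.values groups).filter (fun g => ((g.length : Int) = complete_number))

-- ===== PRECONDITION & SPEC =====
-- Pre_ excludes exactly the inputs where Python A raises IndexError: varls shorter than 3,
-- or some row too short for the projection indices (every index in dexlist must be in range).
def Pre_complete_list (query_list : List (List Int)) (varls : List Int) : Prop :=
  3 ≤ varls.length ∧
  ∀ row ∈ query_list,
    (if PySem.List.pyGetD varls 0 0 = PySem.List.pyGetD varls 2 0 - 1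
     then PySem.List.pyGetD varls 2 0 - 1 else PySem.List.pyGetD varls 2 0) ≤ (row.length : Int)
instance (query_list : List (List Int)) (varls : List Int) : Decidable (Pre_complete_list query_list varls) := by
  unfold Pre_complete_list; infer_instance

def pvWitness_complete_list : List (List Int) × List Int := ([[1, 2], [1, 3], [0, 5]], [1, 2, 2])

def Spec_complete_list (query_list : List (List Int)) (varls : List Int) (out : List (List (List Int))) : Prop := out = complete_list_alt query_list varls
instance (query_list : List (List Int)) (varls : List Int) (out : List (List (List Int))) : Decidable (Spec_complete_list query_list varls out) := by unfold Spec_complete_list; infer_instance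

-- ===== CLAIM (what is proved, stated in full; the proofs are below) =====
def Claim_equal_complete_list : Prop := ∀ (query_list : List (List Int)) (varls : List Int), Dom_complete_list query_list varls → Pre_complete_list query_list varls → Spec_complete_list query_list varls (complete_list query_list varls)

-- ===== LEMMAS AND PROOFS =====

-- A's remove_dups is exactly set-insertion dedup.
theorem removeDups_eq_ofList (s : List (List Int)) : removeDups s = PySem.Set.ofList s := by
  rw [removeDups, PySem.Set.ofList_eq_foldl]
  congr 1
  funext u x
  rw [PySem.Set.add_eq_ite]

-- A's "rows of query_list at the positions where testlist equals ui" is a plain filter,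
-- when testlist is the projection of query_list (generalized over a prefix for the induction).
theorem enumerate_index_filter (f : List Int → List Int) (ui : List Int) :
    ∀ (ql pre : List (List Int)),
      ((PySem.List.enumerate (ql.map f) (pre.length : Int)).filter (fun p => p.2 == ui)).map
          (fun p => PySem.List.pyGetD (pre ++ ql) p.1 []) =
        ql.filter (fun r => f r == ui) := by
  intro ql
  induction ql with
  | nil => intro pre; simp [PySem.List.enumerate_nil]
  | cons r rest ih =>
    intro pre
    have hget : PySem.List.pyGetD (pre ++ r :: rest) (pre.length : Int) [] = r := by
      rw [PySem.List.pyGetD_natCast]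
      rw [List.getD, List.getElem?_append_right (Nat.le_refl _)]
      simp
    have hshift : ((pre.length : Int) + 1) = (((pre ++ [r]).length : Int)) := by
      simp
    have htail :
        ((PySem.List.enumerate (rest.map f) ((pre.length : Int) + 1)).filter
            (fun p => p.2 == ui)).map (fun p => PySem.List.pyGetD (pre ++ r :: rest) p.1 []) =
          rest.filter (fun r => f r == ui) := by
      have h2 := ih (pre ++ [r])
      rw [hshift]
      simpa using h2
    simp only [List.map_cons, PySem.List.enumerate_cons, List.filter_cons]
    by_cases h : f r == ui
    · simp [h, hget, htail]
    · simp [h, htail]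

-- B's grouping dict: values in key-first-occurrence order are the plain filters by key.
theorem groups_values (key : List Int → List Int) (ql : List (List Int)) :
    (ql.foldl (fun d row => d.modify (key row) [] (· ++ [row]))
        (PySem.Dict.empty : PySem.Dict (List Int) (List (List Int)))).values =
      (PySem.Set.ofList (ql.map key)).map (fun k => ql.filter (fun r => key r == k)) := by
  set d := ql.foldl (fun d row => d.modify (key row) [] (· ++ [row]))
      (PySem.Dict.empty : PySem.Dict (List Int) (List (List Int))) with hd
  have hnd : d.keys.Nodup := by
    rw [hd]
    exact PySem.Dict.nodup_keys_foldl_modify_key ql key [] (fun _ row => (· ++ [row])) _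
      PySem.Dict.nodup_keys_empty
  have hkeys : d.keys = PySem.Set.ofList (ql.map key) := by
    rw [hd, PySem.Dict.keys_foldl_modify_key]
    simp [PySem.Dict.keys_empty, PySem.Set.update_nil_left]
  have hgetD : ∀ k, d.getD k [] = ql.filter (fun r => key r == k) := by
    intro k
    have hfold : ql.foldl (fun d row => d.modify (key row) [] (· ++ [row]))
        (PySem.Dict.empty : PySem.Dict (List Int) (List (List Int))) =
        (ql.map (fun r => (key r, r))).foldl
          (fun (d : PySem.Dict (List Int) (List (List Int))) p => d.modify p.1 [] (· ++ [p.2]))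
          PySem.Dict.empty := by
      rw [List.foldl_map]
    rw [hd, hfold, PySem.Dict.getD_foldl_modify_append]
    simp [PySem.Dict.getD_empty, List.filter_map, Function.comp_def]
  rw [PySem.Dict.values_eq_map_keys d hnd [], hkeys]
  exact List.map_congr_left (fun k _ => hgetD k)

-- count in the projected list = size of the group.
theorem count_map_eq_length_filter (key : List Int → List Int) (ql : List (List Int))
    (ui : List Int) :
    (ql.map key).count ui = (ql.filter (fun r => key r == ui)).length := by
  rw [List.count_eq_countP, List.countP_map, ← List.countP_eq_length_filter]
  rfl

theorem complete_list_spec : Claim_equal_complete_list := by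
  intro ql varls _ _
  unfold Spec_complete_list complete_list complete_list_alt
  simp only []
  set vi := PySem.List.pyGetD varls 0 0 with hvi
  set cn := PySem.List.pyGetD varls 1 0 with hcn
  set nv := PySem.List.pyGetD varls 2 0 with hnv
  set key : List Int → List Int := fun row =>
    ((PySem.List.pyRange 0 nv 1).filter (fun i => i ≠ vi)).map (fun i => PySem.List.pyGetD row i 0)
    with hkey
  -- A's dexlist loop is a filter, and the testlist loop is a map by `key`
  rw [PySem.List.foldl_append_ite_eq_filter]
  rw [PySem.List.foldl_append_singleton_eq_map]
  rw [List.nil_append]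
  rw [removeDups_eq_ofList]
  -- A's output loop is filter-then-map over the unique projections
  rw [PySem.List.foldl_append_ite]
  rw [List.nil_append]
  -- B's side
  rw [groups_values key ql, List.filter_map]
  -- the groups coincide
  have hgrp : ∀ ui, ((PySem.List.enumerate (ql.map key) 0).filter (fun p => p.2 == ui)).map
      (fun p => PySem.List.pyGetD ql p.1 []) = ql.filter (fun r => key r == ui) := by
    intro ui
    have h := enumerate_index_filter key ui ql []
    simpa using h
  have hcount : ∀ ui, (decide (((ql.map key).count ui : Int) = cn)) =
      (decide (((ql.filter (fun r => key r == ui)).length : Int) = cn)) := by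
    intro ui
    rw [count_map_eq_length_filter]
  calc ((PySem.Set.ofList (ql.map key)).filter
          (fun ui => decide (((ql.map key).count ui : Int) = cn))).map
        (fun ui => ((PySem.List.enumerate (ql.map key) 0).filter (fun p => p.2 == ui)).map
          (fun p => PySem.List.pyGetD ql p.1 []))
      = ((PySem.Set.ofList (ql.map key)).filter
          (fun ui => decide (((ql.filter (fun r => key r == ui)).length : Int) = cn))).map
        (fun ui => ql.filter (fun r => key r == ui)) := by
        rw [List.filter_congr (fun ui _ => hcount ui)]
        exact List.map_congr_left (fun ui _ => hgrp ui)
    _ = _ := rfl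

-- ===== VERDICT (by name: the statement is the Claim_ definition above) =====
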